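-- pv_equiv track=rewrite | github.com/Sorooshi/KEFRiN | processing_tools.py | flat_ground_truth
-- ===== SOURCE A (Python) =====
-- from typing import Tuple, Dict, Any, Optional
--
-- def flat_ground_truth(ground_truth: list) -> Tuple[list, list]:
--     """
--     Convert ground truth cluster sizes to flat labels (legacy compatibility)
--
--     Args:
--         ground_truth: List of cluster sizes
--
--     Returns:
--         Labels list and indices list
--     """
--     labels_true = []
--     labels_true_indices = []
--
--     current_id = 0
--     for cluster_id, cluster_size in enumerate(ground_truth):
--         cluster_indices = list(range(current_id, current_id + cluster_size))
--         labels_true.extend([cluster_id] * cluster_size)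
--         labels_true_indices.extend(cluster_indices)
--         current_id += cluster_size
--
--     return labels_true, labels_true_indices
-- ===== SOURCE B (Python) =====
-- def flat_ground_truth(ground_truth: list):
--     # divide and conquer over index segments: each half is solved recursively,
--     # the right half's label base is the segment midpoint and its index base is
--     # the segment-sum of the left half (computed per split, no running counter)
--     labels_true = []
--     labels_true_indices = []
--     emit_labels = labels_true.extend
--     emit_indices = labels_true_indices.extend
--
--     def go(i, j, cbase, obase):
--         if j - i == 1:
--             s = ground_truth[i]
--             emit_labels([cbase] * s)
--             emit_indices(range(obase, obase + s))
--             return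
--         mid = (i + j) // 2
--         go(i, mid, cbase, obase)
--         go(mid, j, cbase + (mid - i), obase + sum(ground_truth[i:mid]))
--
--     if ground_truth:
--         go(0, len(ground_truth), 0, 0)
--     return labels_true, labels_true_indices
-- ===== Notes on version B (the rewrite author's own statement) =====
-- stated objective: alternative
-- what changed: Replaces A's single left-to-right loop carrying a running current_id by a divide-and-conquer recursion over index segments: each half is emitted independently, the right half's label base being the segment midpoint and its index base the left half's segment sum.
import Mathlib
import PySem

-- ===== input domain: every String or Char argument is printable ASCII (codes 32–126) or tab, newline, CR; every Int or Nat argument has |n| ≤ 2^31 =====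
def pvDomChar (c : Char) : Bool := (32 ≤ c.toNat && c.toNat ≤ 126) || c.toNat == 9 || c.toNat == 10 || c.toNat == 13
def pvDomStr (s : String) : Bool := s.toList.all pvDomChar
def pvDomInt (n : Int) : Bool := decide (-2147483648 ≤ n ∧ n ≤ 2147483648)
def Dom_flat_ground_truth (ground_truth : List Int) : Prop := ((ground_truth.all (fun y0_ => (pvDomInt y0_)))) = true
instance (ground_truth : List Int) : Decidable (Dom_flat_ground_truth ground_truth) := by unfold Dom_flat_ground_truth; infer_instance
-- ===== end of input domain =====

-- B replaces A's single left-to-right loop with a running current_id by a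
-- divide-and-conquer recursion over index segments, the right half's bases
-- computed from the midpoint and the left segment's sum (objective: alternative).

-- ===== PORT A =====
-- loop state: (labels_true, labels_true_indices, current_id)
def flat_ground_truth (ground_truth : List Int) : List Int × List Int :=
  let st := (PySem.List.enumerate ground_truth 0).foldl
    (fun (st : List Int × List Int × Int) p =>
      let cluster_indices := PySem.List.pyRange st.2.2 (st.2.2 + p.2) 1
      (st.1 ++ PySem.List.pyRepeat [p.1] p.2,
       st.2.1 ++ cluster_indices,
       st.2.2 + p.2))
    ([], [], 0)
  (st.1, st.2.1)

-- ===== PORT B =====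
-- port of Source B's inner go: the accumulator lists labels_true / labels_true_indices
-- are threaded as explicit arguments; ground_truth[i] with 0 <= i < len is exactly
-- pyGetD, ground_truth[i:mid] is slice, [cbase]*s is replicate s.toNat, and
-- range(obase, obase+s) is pyRange obase (obase+s) 1
def pvGo (gt : List Int) (i j : Nat) (cbase obase : Int)
    (labels indices : List Int) : List Int × List Int :=
  if j - i <= 1 then  -- '= 1' in Source B; '<= 1' only makes the unreached empty segment total
    (labels ++ List.replicate (PySem.List.pyGetD gt (i : Int) 0).toNat cbase,
     indices ++ PySem.List.pyRange obase (obase + PySem.List.pyGetD gt (i : Int) 0) 1)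
  else
    pvGo gt ((i + j) / 2) j
      (cbase + (((i + j) / 2 : Nat) : Int) - (i : Int))
      (obase + (PySem.List.slice gt (some (i : Int)) (some (((i + j) / 2 : Nat) : Int))).sum)
      (pvGo gt i ((i + j) / 2) cbase obase labels indices).1
      (pvGo gt i ((i + j) / 2) cbase obase labels indices).2
termination_by j - i
decreasing_by
  · omega
  · omega

def flat_ground_truth_alt (ground_truth : List Int) : List Int × List Int :=
  if ground_truth = [] then ([], [])
  else pvGo ground_truth 0 ground_truth.length 0 0 [] []

-- ===== PRECONDITION & SPEC =====
def Spec_flat_ground_truth (ground_truth : List Int) (out : List Int × List Int) : Prop := out = flat_ground_truth_alt ground_truth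
instance (ground_truth : List Int) (out : List Int × List Int) : Decidable (Spec_flat_ground_truth ground_truth out) := by unfold Spec_flat_ground_truth; infer_instance

-- ===== CLAIM (what is proved, stated in full; the proofs are below) =====
def Claim_equal_flat_ground_truth : Prop := ∀ (ground_truth : List Int), Dom_flat_ground_truth ground_truth → Spec_flat_ground_truth ground_truth (flat_ground_truth ground_truth)

-- ===== LEMMAS AND PROOFS =====

-- reference shapes of the two output lists
def pvLabSpec (i : Int) : List Int → List Int
  | [] => []
  | s :: t => List.replicate s.toNat i ++ pvLabSpec (i + 1) t

def pvIdxSpec (c : Int) : List Int → List Int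
  | [] => []
  | s :: t => PySem.List.pyRange c (c + s) 1 ++ pvIdxSpec (c + s) t

-- A's fold produces the reference shapes
theorem flat_a_fold (gt : List Int) : ∀ (s : Int) (la li : List Int) (c : Int),
    (PySem.List.enumerate gt s).foldl
      (fun (st : List Int × List Int × Int) p =>
        (st.1 ++ PySem.List.pyRepeat [p.1] p.2,
         st.2.1 ++ PySem.List.pyRange st.2.2 (st.2.2 + p.2) 1,
         st.2.2 + p.2))
      (la, li, c)
    = (la ++ pvLabSpec s gt, li ++ pvIdxSpec c gt, c + gt.sum) := by
  induction gt with
  | nil => intro s la li c; simp [PySem.List.enumerate_nil, pvLabSpec, pvIdxSpec]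
  | cons x t ih =>
    intro s la li c
    rw [PySem.List.enumerate_cons]
    simp only [List.foldl_cons, ih]
    simp [pvLabSpec, pvIdxSpec, PySem.List.pyRepeat_singleton, List.append_assoc]
    omega

-- append lemmas: the reference shapes split at any point
theorem pvLabSpec_append (l r : List Int) : ∀ (i : Int),
    pvLabSpec i (l ++ r) = pvLabSpec i l ++ pvLabSpec (i + l.length) r := by
  induction l with
  | nil => intro i; simp [pvLabSpec]
  | cons s t ih =>
    intro i
    simp only [List.cons_append, pvLabSpec, ih, List.append_assoc, List.length_cons]
    rw [show i + 1 + (t.length : Int) = i + ((t.length : Int) + 1) by ring]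
    push_cast; ring_nf

theorem pvIdxSpec_append (l r : List Int) : ∀ (c : Int),
    pvIdxSpec c (l ++ r) = pvIdxSpec c l ++ pvIdxSpec (c + l.sum) r := by
  induction l with
  | nil => intro c; simp [pvIdxSpec]
  | cons s t ih =>
    intro c
    simp only [List.cons_append, pvIdxSpec, ih, List.append_assoc, List.sum_cons]
    rw [show c + s + t.sum = c + (s + t.sum) by ring]

-- B's recursion emits exactly the reference shapes of its segment
theorem pvGo_spec (gt : List Int) (i j : Nat) (cbase obase : Int)
    (labels indices : List Int) (hij : i < j) (hj : j ≤ gt.length) :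
    pvGo gt i j cbase obase labels indices
      = (labels ++ pvLabSpec cbase ((gt.drop i).take (j - i)),
         indices ++ pvIdxSpec obase ((gt.drop i).take (j - i))) := by
  induction i, j, cbase, obase, labels, indices using pvGo.induct gt with
  | case1 i j cbase obase labels indices h =>
    have h1 : j - i = 1 := by omega
    have hi : i < gt.length := by omega
    have hseg : (gt.drop i).take (j - i) = [gt.getD i 0] := by
      rw [h1, List.getD_eq_getElem _ _ hi, List.take_one, List.head?_drop,
          List.getElem?_eq_getElem hi]
      rfl
    rw [pvGo, if_pos h, hseg]
    simp [pvLabSpec, pvIdxSpec, PySem.List.pyGetD_natCast]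
  | case2 i j cbase obase labels indices h ih1 ih2 =>
    have h1 : i < (i + j) / 2 := by omega
    have h2 : (i + j) / 2 < j := by omega
    have ihL := ih1 h1 (by omega)
    have ihR := ih2 h2 hj
    rw [ihL] at ihR
    rw [pvGo, if_neg h, ihL, ihR]
    have hsplit : (gt.drop i).take (j - i)
        = (gt.drop i).take ((i + j) / 2 - i) ++ (gt.drop ((i + j) / 2)).take (j - (i + j) / 2) := by
      rw [← List.take_append_drop ((i + j) / 2 - i) ((gt.drop i).take (j - i))]
      congr 1
      · rw [List.take_take, show min ((i + j) / 2 - i) (j - i) = (i + j) / 2 - i by omega]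
      · rw [List.drop_take, List.drop_drop,
            show i + ((i + j) / 2 - i) = (i + j) / 2 by omega,
            show j - i - ((i + j) / 2 - i) = j - (i + j) / 2 by omega]
    have hlen : ((gt.drop i).take ((i + j) / 2 - i)).length = (i + j) / 2 - i := by
      rw [List.length_take, List.length_drop]; omega
    have hslice : PySem.List.slice gt (some (i : Int)) (some ((((i + j) / 2 : Nat)) : Int))
        = (gt.drop i).take ((i + j) / 2 - i) := by
      rw [PySem.List.slice_natCast]
    rw [hsplit, pvLabSpec_append, pvIdxSpec_append, hlen, hslice]
    rw [show cbase + (((i + j) / 2 - i : Nat) : Int)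
        = cbase + (((i + j) / 2 : Nat) : Int) - (i : Int) by push_cast [Nat.le_of_lt h1]; ring]
    simp [List.append_assoc]

-- ===== VERDICT (by name: the statement is the Claim_ definition above) =====
theorem flat_ground_truth_spec : Claim_equal_flat_ground_truth := by
  intro gt _
  unfold Spec_flat_ground_truth flat_ground_truth flat_ground_truth_alt
  rw [flat_a_fold gt 0 [] [] 0]
  by_cases hgt : gt = []
  · subst hgt; simp [pvLabSpec, pvIdxSpec]
  · rw [if_neg hgt, pvGo_spec gt 0 gt.length 0 0 [] []
        (by cases gt with | nil => exact absurd rfl hgt | cons a t => simp) le_rfl]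
    simp
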